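-- pv_equiv track=rewrite | github.com/innazh/algo-practice | HackerRank/SearchBusinesses/main.py | search_businesses
-- ===== SOURCE A (Python) =====
-- def search_businesses(businesses, search_term):
--     search_term = search_term.lower()
--     result = []
--
--     for b in businesses:
--         b_lower = b.lower()
--
--         if b_lower.startswith(search_term):
--             result.append(b)
--             continue
--
--         indices = []
--         for i in range(1,len(b_lower)):
--             if b_lower[i-1]==' ':
--                 indices.append(i)
--
--         for start in indices:
--             if b_lower[start:].startswith(search_term):
--                 result.append(b)
--                 break
--
--     return result
-- ===== SOURCE B (Python) =====
-- def search_businesses(businesses, search_term):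
--     t = search_term.lower()
--     st = ' ' + t
--     return [b for b in businesses
--             if (bl := b.lower()).startswith(t) or st in bl]
-- ===== Notes on version B (the rewrite author's own statement) =====
-- stated objective: faster
-- what changed: Replaces A's per-string Python-level loop that collects every post-space index and then slices and startswith-tests each one by a single C-level substring containment test (' '+term in lowered name), with the lowered name and the prepended pattern computed once.
import Mathlib
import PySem

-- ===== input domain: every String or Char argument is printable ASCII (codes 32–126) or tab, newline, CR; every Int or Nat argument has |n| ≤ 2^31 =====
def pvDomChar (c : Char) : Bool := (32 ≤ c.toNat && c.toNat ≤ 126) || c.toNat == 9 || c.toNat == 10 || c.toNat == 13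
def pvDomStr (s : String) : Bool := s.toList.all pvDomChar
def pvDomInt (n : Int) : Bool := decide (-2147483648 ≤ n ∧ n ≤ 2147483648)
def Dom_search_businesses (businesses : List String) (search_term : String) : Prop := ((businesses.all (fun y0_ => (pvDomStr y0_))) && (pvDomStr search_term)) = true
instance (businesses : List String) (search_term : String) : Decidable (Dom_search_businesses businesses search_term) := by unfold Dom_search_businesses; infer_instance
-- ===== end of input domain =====

-- B replaces A's space-index collection loop and per-index slice/startswith scan with a single
-- substring containment test (' '+term in lowered name); measured faster by a constant factor.

-- ===== PORT A =====
-- the 'for start in indices: … break' loop of A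
def pvScanStarts (bl t b : String) (result : List String) : List Int → List String
  | [] => result
  | s :: rest =>
    if PySem.Str.startswith (PySem.Str.slice bl (some s) none) t then result ++ [b]
    else pvScanStarts bl t b result rest

def search_businesses (businesses : List String) (search_term : String) : List String :=
  let t := PySem.Str.lower search_term
  businesses.foldl (fun result b =>
    let bl := PySem.Str.lower b
    if PySem.Str.startswith bl t then result ++ [b]
    else
      let indices := (PySem.List.pyRange 1 (PySem.Str.len bl) 1).foldl
        (fun acc i => if PySem.Str.pyGet? bl (i - 1) == some ' ' then acc ++ [i] else acc) []
      pvScanStarts bl t b result indices) []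

-- ===== PORT B =====
def search_businesses_alt (businesses : List String) (search_term : String) : List String :=
  let t := PySem.Str.lower search_term
  let st := " " ++ t
  businesses.filter (fun b =>
    let bl := PySem.Str.lower b
    PySem.Str.startswith bl t || PySem.Str.isIn st bl)

-- ===== PRECONDITION & SPEC =====
def Spec_search_businesses (businesses : List String) (search_term : String) (out : List String) : Prop := out = search_businesses_alt businesses search_term
instance (businesses : List String) (search_term : String) (out : List String) : Decidable (Spec_search_businesses businesses search_term out) := by unfold Spec_search_businesses; infer_instance

-- ===== CLAIM (what is proved, stated in full; the proofs are below) =====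
def Claim_equal_search_businesses : Prop := ∀ (businesses : List String) (search_term : String), Dom_search_businesses businesses search_term → Spec_search_businesses businesses search_term (search_businesses businesses search_term)

-- ===== LEMMAS AND PROOFS =====

-- A's break-scan returns result ++ [b] iff some start matches
lemma pvScanStarts_eq (bl t b : String) (result : List String) (idx : List Int) :
    pvScanStarts bl t b result idx =
      if idx.any (fun s => PySem.Str.startswith (PySem.Str.slice bl (some s) none) t)
      then result ++ [b] else result := by
  induction idx with
  | nil => simp [pvScanStarts]
  | cons s rest ih =>
    simp only [pvScanStarts, List.any_cons]
    rw [ih]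
    simp only [Bool.or_eq_true]
    split_ifs with h1 h2 h3 <;> first | rfl | tauto

-- the core per-string equivalence, on the list-of-chars side
lemma keep_core (L T : List Char) (hT : ¬ T <+: L) :
    ((PySem.List.pyRange 1 (L.length : Int) 1).any (fun i =>
        (PySem.List.pyGet? L (i - 1) == some ' ') &&
        PySem.Chars.startswith (PySem.Chars.slice L (some i) none) T)
      = PySem.Chars.isIn (' ' :: T) L) := by
  rcases hisIn : PySem.Chars.isIn (' ' :: T) L with _ | _
  · -- isIn false: no index can match
    rw [List.any_eq_false]
    intro i hi
    rw [PySem.List.mem_pyRange_one] at hi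
    simp only [Bool.and_eq_true, beq_iff_eq, not_and]
    intro hsp hsw
    -- build an occurrence of ' '::T, contradiction with hisIn
    have h0i : 0 ≤ i := by omega
    rw [PySem.Chars.slice_eq_listSlice, PySem.List.slice_from L (by omega)] at hsw
    rw [PySem.Chars.startswith_iff] at hsw
    have hk : i.toNat - 1 < L.length := by omega
    have hidx : PySem.List.pyGet? L (i - 1) = L[i.toNat - 1]? := by
      have : (i - 1) = ((i.toNat - 1 : Nat) : Int) := by omega
      rw [this, PySem.List.pyGet?_natCast]
    rw [hidx, List.getElem?_eq_getElem hk] at hsp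
    have hdrop : L.drop (i.toNat - 1) = L[i.toNat - 1] :: L.drop (i.toNat - 1 + 1) :=
      List.drop_eq_getElem_cons hk
    have hiN : i.toNat - 1 + 1 = i.toNat := by omega
    have hpre : (' ' :: T) <+: L.drop (i.toNat - 1) := by
      rw [hdrop, hiN]
      simp only [Option.some.injEq] at hsp
      rw [hsp]
      exact List.cons_prefix_cons.mpr ⟨rfl, hsw⟩
    have : PySem.Chars.isIn (' ' :: T) L = true :=
      (PySem.Chars.exists_prefix_drop_iff_isIn _ _).mp ⟨_, hpre⟩
    rw [hisIn] at this; cases this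
  · -- isIn true: produce a matching index
    have hTne : T ≠ [] := by rintro rfl; exact hT (List.nil_prefix)
    obtain ⟨j, hj⟩ := (PySem.Chars.exists_prefix_drop_iff_isIn (' ' :: T) L).mpr hisIn
    obtain ⟨r, hr⟩ := hj
    have hjlen : j < L.length := by
      by_contra h
      rw [List.drop_eq_nil_of_le (by omega)] at hr
      simp at hr
    have htail : L.drop (j + 1) = T ++ r := by
      have h := congrArg List.tail hr
      simpa [List.tail_drop] using h.symm
    have hj1len : j + 1 < L.length := by
      by_contra h
      rw [List.drop_eq_nil_of_le (by omega)] at htail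
      exact hTne (List.append_eq_nil_iff.mp htail.symm).1
    have hLj : L[j]? = some ' ' := by
      have h0 : (L.drop j)[0]? = L[j]? := by simp
      rw [← h0, ← hr]; rfl
    rw [List.any_eq_true]
    refine ⟨(j + 1 : Nat), ?_, ?_⟩
    · rw [PySem.List.mem_pyRange_one]
      constructor <;> [omega; exact_mod_cast hj1len]
    · simp only [Bool.and_eq_true, beq_iff_eq]
      constructor
      · have : ((j + 1 : Nat) : Int) - 1 = ((j : Nat) : Int) := by omega
        rw [this, PySem.List.pyGet?_natCast]; exact hLj
      · rw [PySem.Chars.slice_eq_listSlice, PySem.List.slice_from L (by positivity)]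
        rw [PySem.Chars.startswith_iff]
        have : ((((j + 1 : Nat) : Int)).toNat) = j + 1 := by omega
        rw [this, htail]
        exact ⟨r, rfl⟩

-- per-element: A's keep decision equals B's predicate
lemma keep_eq (b t : String) :
    (let bl := PySem.Str.lower b
     if PySem.Str.startswith bl t then true
     else ((PySem.List.pyRange 1 (PySem.Str.len bl) 1).foldl
        (fun acc i => if PySem.Str.pyGet? bl (i - 1) == some ' ' then acc ++ [i] else acc) []).any
        (fun s => PySem.Str.startswith (PySem.Str.slice bl (some s) none) t))
    = (PySem.Str.startswith (PySem.Str.lower b) t || PySem.Str.isIn (" " ++ t) (PySem.Str.lower b)) := by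
  set bl := PySem.Str.lower b with hbl
  show (if PySem.Str.startswith bl t then true
     else ((PySem.List.pyRange 1 (PySem.Str.len bl) 1).foldl
        (fun acc i => if PySem.Str.pyGet? bl (i - 1) == some ' ' then acc ++ [i] else acc) []).any
        (fun s => PySem.Str.startswith (PySem.Str.slice bl (some s) none) t))
    = (PySem.Str.startswith bl t || PySem.Str.isIn (" " ++ t) bl)
  by_cases hsw : PySem.Str.startswith bl t = true
  · rw [if_pos hsw, hsw, Bool.true_or]
  · have hf : PySem.Str.startswith bl t = false := Bool.eq_false_iff.mpr hsw
    rw [if_neg hsw, hf, Bool.false_or,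
      PySem.List.foldl_append_if_eq_filter, List.nil_append, List.any_filter]
    have h1 : PySem.Str.len bl = ((bl.toList.length : Nat) : Int) := by
      simp [PySem.Str.len_eq]
    have h2 : (" " ++ t).toList = ' ' :: t.toList := by simp
    have hT : ¬ t.toList <+: bl.toList := by
      intro h
      exact hsw (by simpa [PySem.Str.startswith_eq, PySem.Chars.startswith_iff] using h)
    have hc := keep_core bl.toList t.toList hT
    simp only [PySem.Chars.slice_eq_listSlice] at hc
    simp only [PySem.Str.isIn_eq, h2, PySem.Str.startswith_eq, PySem.Str.toList_slice,
      PySem.Chars.slice_eq_listSlice, PySem.Str.pyGet?_eq, h1]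
    exact hc

-- one step of A's loop decides exactly by B's predicate
lemma step_eq (t b : String) (acc : List String) :
    (let bl := PySem.Str.lower b
     if PySem.Str.startswith bl t then acc ++ [b]
     else
       let indices := (PySem.List.pyRange 1 (PySem.Str.len bl) 1).foldl
         (fun a i => if PySem.Str.pyGet? bl (i - 1) == some ' ' then a ++ [i] else a) []
       pvScanStarts bl t b acc indices)
    = (if (PySem.Str.startswith (PySem.Str.lower b) t
           || PySem.Str.isIn (" " ++ t) (PySem.Str.lower b)) then acc ++ [b] else acc) := by
  have hk := keep_eq b t
  simp only [] at hk ⊢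
  by_cases hsw : PySem.Str.startswith (PySem.Str.lower b) t = true
  · rw [if_pos hsw, ← hk, if_pos hsw, if_pos rfl]
  · rw [if_neg hsw, pvScanStarts_eq, ← hk, if_neg hsw]

-- A's main loop is a filter by B's predicate
lemma foldl_eq_filter (t : String) (bs : List String) (acc : List String) :
    bs.foldl (fun result b =>
      let bl := PySem.Str.lower b
      if PySem.Str.startswith bl t then result ++ [b]
      else
        let indices := (PySem.List.pyRange 1 (PySem.Str.len bl) 1).foldl
          (fun a i => if PySem.Str.pyGet? bl (i - 1) == some ' ' then a ++ [i] else a) []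
        pvScanStarts bl t b result indices) acc
    = acc ++ bs.filter (fun b =>
        PySem.Str.startswith (PySem.Str.lower b) t || PySem.Str.isIn (" " ++ t) (PySem.Str.lower b)) := by
  simp only [step_eq]
  exact PySem.List.foldl_append_if_eq_filter _ bs acc

-- ===== VERDICT (by name: the statement is the Claim_ definition above) =====
theorem search_businesses_spec : Claim_equal_search_businesses := by
  intro businesses search_term _
  unfold Spec_search_businesses search_businesses search_businesses_alt
  simpa using foldl_eq_filter (PySem.Str.lower search_term) businesses []
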